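-- pv_equiv track=rewrite | github.com/ThomBors/MTLforMLNDs | MTLDeploy/MTL/utils.py | Create_target
-- ===== SOURCE A (Python) =====
-- def Create_target(y):
--     y_AD = []
--     y_MCI = []
--     y_EMCI = []
--     y_LMCI = []
--     y_FTD = []
--     y_PD = []
--     y_CN = []
--     for i in y:
--         if i == 'AD':
--             y_AD.append(1)
--             y_MCI.append(1)
--             y_EMCI.append(1)
--             y_LMCI.append(1)
--             y_FTD.append(0)
--             y_PD.append(0)
--             y_CN.append(0)
--
--         elif i == 'FTD':
--             y_AD.append(0)
--             y_MCI.append(1)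
--             y_EMCI.append(1)
--             y_LMCI.append(1)
--             y_FTD.append(1)
--             y_PD.append(0)
--             y_CN.append(0)
--
--         elif i == 'PD':
--             y_AD.append(0)
--             y_MCI.append(0)
--             y_EMCI.append(0)
--             y_LMCI.append(0)
--             y_FTD.append(0)
--             y_PD.append(1)
--             y_CN.append(0)
--
--         elif i == 'LMCI':
--             y_AD.append(0)
--             y_MCI.append(1)
--             y_EMCI.append(1)
--             y_LMCI.append(1)
--             y_FTD.append(0)
--             y_PD.append(0)
--             y_CN.append(0)
--
--         elif i == 'MCI':
--             y_AD.append(0)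
--             y_MCI.append(1)
--             y_EMCI.append(1)
--             y_LMCI.append(1)
--             y_FTD.append(0)
--             y_PD.append(0)
--             y_CN.append(0)
--
--         elif i == 'EMCI':
--             y_AD.append(0)
--             y_MCI.append(1)
--             y_EMCI.append(1)
--             y_LMCI.append(0)
--             y_FTD.append(0)
--             y_PD.append(0)
--             y_CN.append(0)
--
--         else:
--             y_AD.append(0)
--             y_MCI.append(0)
--             y_EMCI.append(0)
--             y_LMCI.append(0)
--             y_FTD.append(0)
--             y_PD.append(0)
--             y_CN.append(1)
--
--     return y_AD,y_PD,y_MCI,y_EMCI,y_LMCI,y_FTD,y_CN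
-- ===== SOURCE B (Python) =====
-- _TABLE = {
--     # (AD, PD, MCI, EMCI, LMCI, FTD, CN) in the return order
--     'AD':   (1, 0, 1, 1, 1, 0, 0),
--     'FTD':  (0, 0, 1, 1, 1, 1, 0),
--     'PD':   (0, 1, 0, 0, 0, 0, 0),
--     'LMCI': (0, 0, 1, 1, 1, 0, 0),
--     'MCI':  (0, 0, 1, 1, 1, 0, 0),
--     'EMCI': (0, 0, 1, 1, 0, 0, 0),
-- }
-- _DEFAULT = (0, 0, 0, 0, 0, 0, 1)
--
-- def Create_target(y):
--     rows = [_TABLE.get(i, _DEFAULT) for i in y]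
--     if not rows:
--         return [], [], [], [], [], [], []
--     return tuple(list(col) for col in zip(*rows))
-- ===== Notes on version B (the rewrite author's own statement) =====
-- stated objective: simpler
-- what changed: Replaces the seven-way if/elif chain with seven parallel per-branch appends by a label-to-row lookup table (dict.get with a CN default), one map building per-element rows, and a transpose of the rows into the seven output columns.
import Mathlib
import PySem

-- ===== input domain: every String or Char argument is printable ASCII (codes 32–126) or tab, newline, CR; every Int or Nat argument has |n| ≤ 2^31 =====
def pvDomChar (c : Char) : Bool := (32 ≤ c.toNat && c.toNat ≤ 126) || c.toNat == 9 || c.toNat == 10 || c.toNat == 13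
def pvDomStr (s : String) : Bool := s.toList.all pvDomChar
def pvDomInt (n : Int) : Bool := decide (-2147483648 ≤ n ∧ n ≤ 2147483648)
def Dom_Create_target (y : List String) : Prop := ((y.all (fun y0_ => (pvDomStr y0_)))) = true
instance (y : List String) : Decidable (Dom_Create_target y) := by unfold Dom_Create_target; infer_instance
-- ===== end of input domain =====

-- B replaces A's seven parallel append chains (if/elif per label) by a label→row lookup table and a row-to-column transpose; objective: simpler.

-- ===== PORT A =====
-- A's loop: seven accumulator lists, appended to per element according to the if/elif chain; returned in the scrambled order AD,PD,MCI,EMCI,LMCI,FTD,CN.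
def Create_target_loop (y : List String)
    (y_AD y_MCI y_EMCI y_LMCI y_FTD y_PD y_CN : List Int) :
    List Int × List Int × List Int × List Int × List Int × List Int × List Int :=
  match y with
  | [] => (y_AD, y_PD, y_MCI, y_EMCI, y_LMCI, y_FTD, y_CN)
  | i :: rest =>
    if i = "AD" then
      Create_target_loop rest (y_AD ++ [1]) (y_MCI ++ [1]) (y_EMCI ++ [1]) (y_LMCI ++ [1]) (y_FTD ++ [0]) (y_PD ++ [0]) (y_CN ++ [0])
    else if i = "FTD" then
      Create_target_loop rest (y_AD ++ [0]) (y_MCI ++ [1]) (y_EMCI ++ [1]) (y_LMCI ++ [1]) (y_FTD ++ [1]) (y_PD ++ [0]) (y_CN ++ [0])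
    else if i = "PD" then
      Create_target_loop rest (y_AD ++ [0]) (y_MCI ++ [0]) (y_EMCI ++ [0]) (y_LMCI ++ [0]) (y_FTD ++ [0]) (y_PD ++ [1]) (y_CN ++ [0])
    else if i = "LMCI" then
      Create_target_loop rest (y_AD ++ [0]) (y_MCI ++ [1]) (y_EMCI ++ [1]) (y_LMCI ++ [1]) (y_FTD ++ [0]) (y_PD ++ [0]) (y_CN ++ [0])
    else if i = "MCI" then
      Create_target_loop rest (y_AD ++ [0]) (y_MCI ++ [1]) (y_EMCI ++ [1]) (y_LMCI ++ [1]) (y_FTD ++ [0]) (y_PD ++ [0]) (y_CN ++ [0])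
    else if i = "EMCI" then
      Create_target_loop rest (y_AD ++ [0]) (y_MCI ++ [1]) (y_EMCI ++ [1]) (y_LMCI ++ [0]) (y_FTD ++ [0]) (y_PD ++ [0]) (y_CN ++ [0])
    else
      Create_target_loop rest (y_AD ++ [0]) (y_MCI ++ [0]) (y_EMCI ++ [0]) (y_LMCI ++ [0]) (y_FTD ++ [0]) (y_PD ++ [0]) (y_CN ++ [1])

def Create_target (y : List String) : List Int × List Int × List Int × List Int × List Int × List Int × List Int :=
  Create_target_loop y [] [] [] [] [] [] []

-- ===== PORT B =====
-- _TABLE.get(i, _DEFAULT): the label → row dict (rows in return order AD, PD, MCI, EMCI, LMCI, FTD, CN)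
def pvTableGet (i : String) : Int × Int × Int × Int × Int × Int × Int :=
  PySem.Dict.getD (PySem.Dict.ofList
      [("AD",   ((1:Int), (0:Int), (1:Int), (1:Int), (1:Int), (0:Int), (0:Int))),
       ("FTD",  (0, 0, 1, 1, 1, 1, 0)),
       ("PD",   (0, 1, 0, 0, 0, 0, 0)),
       ("LMCI", (0, 0, 1, 1, 1, 0, 0)),
       ("MCI",  (0, 0, 1, 1, 1, 0, 0)),
       ("EMCI", (0, 0, 1, 1, 0, 0, 0))]) i (0, 0, 0, 0, 0, 0, 1)

-- rows = one table row per element; empty case explicit; otherwise transpose rows into the seven columns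
def Create_target_alt (y : List String) : List Int × List Int × List Int × List Int × List Int × List Int × List Int :=
  let rows := y.map pvTableGet
  match rows with
  | [] => ([], [], [], [], [], [], [])
  | _ =>
    (rows.map (fun r => r.1), rows.map (fun r => r.2.1), rows.map (fun r => r.2.2.1),
     rows.map (fun r => r.2.2.2.1), rows.map (fun r => r.2.2.2.2.1),
     rows.map (fun r => r.2.2.2.2.2.1), rows.map (fun r => r.2.2.2.2.2.2))

-- ===== PRECONDITION & SPEC =====
def Spec_Create_target (y : List String) (out : List Int × List Int × List Int × List Int × List Int × List Int × List Int) : Prop := out = Create_target_alt y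
instance (y : List String) (out : List Int × List Int × List Int × List Int × List Int × List Int × List Int) : Decidable (Spec_Create_target y out) := by
  unfold Spec_Create_target
  letI i2 : DecidableEq (List Int × List Int) := inferInstance
  letI i3 : DecidableEq (List Int × List Int × List Int) := @instDecidableEqProd _ _ _ i2
  letI i4 : DecidableEq (List Int × List Int × List Int × List Int) := @instDecidableEqProd _ _ _ i3
  letI i5 : DecidableEq (List Int × List Int × List Int × List Int × List Int) := @instDecidableEqProd _ _ _ i4
  letI i6 : DecidableEq (List Int × List Int × List Int × List Int × List Int × List Int) := @instDecidableEqProd _ _ _ i5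
  letI i7 : DecidableEq (List Int × List Int × List Int × List Int × List Int × List Int × List Int) := @instDecidableEqProd _ _ _ i6
  exact i7 out (Create_target_alt y)

-- ===== CLAIM (what is proved, stated in full; the proofs are below) =====
def Claim_equal_Create_target : Prop := ∀ (y : List String), Dom_Create_target y → Spec_Create_target y (Create_target y)

-- ===== LEMMAS AND PROOFS =====

lemma pvTableGet_AD : pvTableGet "AD" = (1, 0, 1, 1, 1, 0, 0) := by decide
lemma pvTableGet_FTD : pvTableGet "FTD" = (0, 0, 1, 1, 1, 1, 0) := by decide
lemma pvTableGet_PD : pvTableGet "PD" = (0, 1, 0, 0, 0, 0, 0) := by decide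
lemma pvTableGet_LMCI : pvTableGet "LMCI" = (0, 0, 1, 1, 1, 0, 0) := by decide
lemma pvTableGet_MCI : pvTableGet "MCI" = (0, 0, 1, 1, 1, 0, 0) := by decide
lemma pvTableGet_EMCI : pvTableGet "EMCI" = (0, 0, 1, 1, 0, 0, 0) := by decide
lemma pvTableGet_other (i : String) (h1 : i ≠ "AD") (h2 : i ≠ "FTD") (h3 : i ≠ "PD")
    (h4 : i ≠ "LMCI") (h5 : i ≠ "MCI") (h6 : i ≠ "EMCI") :
    pvTableGet i = (0, 0, 0, 0, 0, 0, 1) := by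
  simp [pvTableGet, PySem.Dict.ofList, PySem.Dict.update, PySem.Dict.getD_insert,
    h1, h2, h3, h4, h5, h6, PySem.Dict.getD_empty]

-- A's loop from any accumulators returns the accumulators extended by B's columns.
lemma Create_target_loop_eq (y : List String)
    (a m e l f p c : List Int) :
    Create_target_loop y a m e l f p c =
      (a ++ (y.map pvTableGet).map (fun r => r.1),
       p ++ (y.map pvTableGet).map (fun r => r.2.1),
       m ++ (y.map pvTableGet).map (fun r => r.2.2.1),
       e ++ (y.map pvTableGet).map (fun r => r.2.2.2.1),
       l ++ (y.map pvTableGet).map (fun r => r.2.2.2.2.1),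
       f ++ (y.map pvTableGet).map (fun r => r.2.2.2.2.2.1),
       c ++ (y.map pvTableGet).map (fun r => r.2.2.2.2.2.2)) := by
  induction y generalizing a m e l f p c with
  | nil => simp [Create_target_loop]
  | cons i rest ih =>
    by_cases h1 : i = "AD"
    · subst h1; simp [Create_target_loop, ih, pvTableGet_AD]
    · by_cases h2 : i = "FTD"
      · subst h2; simp [Create_target_loop, ih, pvTableGet_FTD]
      · by_cases h3 : i = "PD"
        · subst h3; simp [Create_target_loop, h1, ih, pvTableGet_PD]
        · by_cases h4 : i = "LMCI"
          · subst h4; simp [Create_target_loop, h1, h2, ih, pvTableGet_LMCI]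
          · by_cases h5 : i = "MCI"
            · subst h5; simp [Create_target_loop, h1, h2, h3, ih, pvTableGet_MCI]
            · by_cases h6 : i = "EMCI"
              · subst h6; simp [Create_target_loop, h1, h2, h3, h4, ih, pvTableGet_EMCI]
              · simp [Create_target_loop, h1, h2, h3, h4, h5, h6, ih,
                  pvTableGet_other i h1 h2 h3 h4 h5 h6]

-- ===== VERDICT (by name: the statement is the Claim_ definition above) =====
theorem Create_target_spec : Claim_equal_Create_target := by
  intro y _
  unfold Spec_Create_target Create_target Create_target_alt
  rw [Create_target_loop_eq]
  cases y with
  | nil => simp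
  | cons i rest => simp
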